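-- pv_equiv track=rewrite | github.com/mbbcardoso/google_foobar | 3-1/3-1 Queue To Do.py | solution
-- ===== SOURCE A (Python) =====
-- def computeXOR(n):
--
--     # Modulus operator are expensive
--     # on most of the computers. n & 3
--     # will be equivalent to n % 4.
--
--     # if n is multiple of 4
--     if n % 4 == 0 :
--         return n
--
--     # If n % 4 gives remainder 1
--     if n % 4 == 1 :
--         return 1
--
--     # If n%4 gives remainder 2
--     if n % 4 == 2 :
--         return n + 1
--
--     # If n%4 gives remainder 3
--     return 0
--
-- def solution(start, length):
--     # process each row at a time
--     first = start
--     step = length - 1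
--     checksum = 0
--     for row in range(length):
--         first = start + length * row
--         last = first + step
--         checksum ^= computeXOR(first-1) ^ computeXOR(last)
--         step -= 1
--     return checksum
-- ===== SOURCE B (Python) =====
-- def solution(start, length):
--     # Pair-cancellation: in each row's block, each (even, odd) consecutive pair
--     # XORs to 1, so after stripping an odd head and an even tail only the
--     # parity of the number of pairs matters.  No prefix-XOR helper needed.
--     checksum = 0
--     for row in range(length):
--         lo = start + length * row
--         hi = lo + (length - 1 - row)
--         if lo % 2 == 1:
--             checksum ^= lo
--             lo += 1
--         if hi % 2 == 0:
--             checksum ^= hi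
--             hi -= 1
--         if lo <= hi and ((hi + 1 - lo) // 2) % 2 == 1:
--             checksum ^= 1
--     return checksum
-- ===== Notes on version B (the rewrite author's own statement) =====
-- stated objective: alternative
-- what changed: Drops the period-4 closed-form prefix-XOR helper (computeXOR) entirely; each row's segment is XORed by pair-cancellation: strip an odd head and an even tail, then every (even,odd) pair XORs to 1 so only the pair count's parity is added.
import Mathlib
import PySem

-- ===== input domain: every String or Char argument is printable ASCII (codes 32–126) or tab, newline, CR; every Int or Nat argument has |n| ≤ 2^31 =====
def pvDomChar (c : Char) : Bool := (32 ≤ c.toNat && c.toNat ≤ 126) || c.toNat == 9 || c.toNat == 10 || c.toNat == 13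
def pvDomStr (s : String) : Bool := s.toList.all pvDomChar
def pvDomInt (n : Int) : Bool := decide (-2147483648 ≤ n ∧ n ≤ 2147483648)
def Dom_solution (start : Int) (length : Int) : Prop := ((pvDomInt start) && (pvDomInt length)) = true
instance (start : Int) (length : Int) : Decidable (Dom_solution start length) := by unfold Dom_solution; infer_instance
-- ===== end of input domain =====

-- B drops A's period-4 closed-form prefix-XOR helper (computeXOR): each row's segment
-- is XORed by pair-cancellation (odd head, even tail, pair-count parity) instead.

-- ===== PORT A =====
def computeXOR (n : Int) : Int :=
  if PySem.Int.mod n 4 = 0 then n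
  else if PySem.Int.mod n 4 = 1 then 1
  else if PySem.Int.mod n 4 = 2 then n + 1
  else 0

def solution (start : Int) (length : Int) : Int :=
  ((PySem.List.pyRange 0 length 1).foldl
    (fun (st : Int × Int × Int) row =>
      let first := start + length * row
      let last := first + st.2.1
      (first, st.2.1 - 1,
        PySem.Int.bxor st.2.2 (PySem.Int.bxor (computeXOR (first - 1)) (computeXOR last))))
    (start, length - 1, 0)).2.2

-- ===== PORT B =====
def solution_alt (start : Int) (length : Int) : Int :=
  (PySem.List.pyRange 0 length 1).foldl
    (fun checksum row =>
      let lo := start + length * row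
      let hi := lo + (length - 1 - row)
      let c1 := if PySem.Int.mod lo 2 = 1 then PySem.Int.bxor checksum lo else checksum
      let lo1 := if PySem.Int.mod lo 2 = 1 then lo + 1 else lo
      let c2 := if PySem.Int.mod hi 2 = 0 then PySem.Int.bxor c1 hi else c1
      let hi1 := if PySem.Int.mod hi 2 = 0 then hi - 1 else hi
      if lo1 ≤ hi1 ∧ PySem.Int.mod (PySem.Int.floordiv (hi1 + 1 - lo1) 2) 2 = 1 then
        PySem.Int.bxor c2 1
      else c2)
    0

-- ===== PRECONDITION & SPEC =====
def Spec_solution (start : Int) (length : Int) (out : Int) : Prop := out = solution_alt start length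
instance (start : Int) (length : Int) (out : Int) : Decidable (Spec_solution start length out) := by unfold Spec_solution; infer_instance

-- ===== CLAIM (what is proved, stated in full; the proofs are below) =====
def Claim_equal_solution : Prop := ∀ (start : Int) (length : Int), Dom_solution start length → Spec_solution start length (solution start length)

-- ===== LEMMAS AND PROOFS =====

-- Decode a (sign, magnitude) pair into the Int it represents in two's-complement style.
def pvDec (sg : Bool) (n : Nat) : Int := if sg then -(n : Int) - 1 else (n : Int)

lemma pvDec_surj (a : Int) : ∃ s n, pvDec s n = a := by
  by_cases h : 0 ≤ a
  · exact ⟨false, a.toNat, by simp [pvDec]; omega⟩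
  · exact ⟨true, (-a - 1).toNat, by simp [pvDec]; omega⟩

lemma pvDec_bxor (s t : Bool) (m n : Nat) :
    PySem.Int.bxor (pvDec s m) (pvDec t n) = pvDec (s ^^ t) (m ^^^ n) := by
  have hm : ¬ (0:Int) ≤ -(m:Int) - 1 := by omega
  have hn : ¬ (0:Int) ≤ -(n:Int) - 1 := by omega
  have em : (-(-(m:Int) - 1) - 1).toNat = m := by omega
  have en : (-(-(n:Int) - 1) - 1).toNat = n := by omega
  cases s <;> cases t <;>
    simp [pvDec, PySem.Int.bxor, hm, hn, em, en] <;> omega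

lemma pv_bxor_assoc (a b c : Int) :
    PySem.Int.bxor (PySem.Int.bxor a b) c = PySem.Int.bxor a (PySem.Int.bxor b c) := by
  obtain ⟨s, m, rfl⟩ := pvDec_surj a
  obtain ⟨t, n, rfl⟩ := pvDec_surj b
  obtain ⟨u, p, rfl⟩ := pvDec_surj c
  simp [pvDec_bxor, Nat.xor_assoc, Bool.xor_assoc]

lemma pv_zero_bxor (a : Int) : PySem.Int.bxor 0 a = a := by
  rw [PySem.Int.bxor_comm, PySem.Int.bxor_zero]

-- XOR of two adjacent integers, the even one first, is 1.
lemma pvAdj (m : Int) (h : m % 2 = 0) : PySem.Int.bxor m (m + 1) = 1 := by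
  by_cases hm : 0 ≤ m
  · have h1 : 0 ≤ m + 1 := by omega
    have h2 : (m + 1).toNat = m.toNat + 1 := by omega
    have he : Even m.toNat := by
      rw [Nat.even_iff]; omega
    simp only [PySem.Int.bxor, if_pos hm, if_pos h1, h2,
      ← Nat.xor_one_of_even he, Nat.xor_xor_cancel_left]
    rfl
  · have h1 : ¬ 0 ≤ m + 1 := by omega
    have h2 : (-m - 1).toNat = (-(m + 1) - 1).toNat + 1 := by omega
    have he : Even (-(m + 1) - 1).toNat := by
      rw [Nat.even_iff]; omega
    simp only [PySem.Int.bxor, if_neg hm, if_neg h1, h2,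
      ← Nat.xor_one_of_even he, Nat.xor_comm _ 1, Nat.xor_xor_cancel_right]
    rfl

-- computeXOR is a prefix-XOR: it satisfies the step identity at every integer.
lemma pvStep (n : Int) : computeXOR n = PySem.Int.bxor (computeXOR (n - 1)) n := by
  have h4 : (0 : Int) < 4 := by norm_num
  unfold computeXOR
  simp only [PySem.Int.mod_eq_emod_of_pos h4]
  have hc : n % 4 = 0 ∨ n % 4 = 1 ∨ n % 4 = 2 ∨ n % 4 = 3 := by omega
  rcases hc with h | h | h | h
  · simp [h, show (n - 1) % 4 = 3 by omega, PySem.Int.bxor_comm]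
  · have h0 : (n - 1) % 4 = 0 := by omega
    simp only [h, h0]
    norm_num
    have := pvAdj (n - 1) (by omega)
    rw [show n - 1 + 1 = n by ring] at this
    exact this.symm
  · have h0 : (n - 1) % 4 = 1 := by omega
    simp only [h, h0]
    norm_num
    have hadj := pvAdj n (by omega)
    calc n + 1 = PySem.Int.bxor (PySem.Int.bxor n n) (n + 1) := by
          rw [PySem.Int.bxor_self, pv_zero_bxor]
      _ = PySem.Int.bxor n (PySem.Int.bxor n (n + 1)) := pv_bxor_assoc ..
      _ = PySem.Int.bxor n 1 := by rw [hadj]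
      _ = PySem.Int.bxor 1 n := PySem.Int.bxor_comm ..
  · have h0 : (n - 1) % 4 = 2 := by omega
    simp only [h, h0]
    norm_num

-- A block of j full (even, odd) pairs starting at an even lo XORs to the parity of j.
lemma pvMid (j : Nat) (lo : Int) (h : lo % 2 = 0) :
    PySem.Int.bxor (computeXOR (lo - 1)) (computeXOR (lo + 2 * j - 1))
      = if j % 2 = 1 then 1 else 0 := by
  induction j with
  | zero =>
      simp [show lo + 2 * ((0:Nat):Int) - 1 = lo - 1 by push_cast; ring, PySem.Int.bxor_self]
  | succ j ih =>
      have e1 : lo + 2 * ((j+1:Nat):Int) - 1 = (lo + 2 * (j:Int) - 1) + 1 + 1 := by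
        push_cast; ring
      rw [e1, pvStep ((lo + 2 * (j:Int) - 1) + 1 + 1),
        show (lo + 2 * (j:Int) - 1) + 1 + 1 - 1 = (lo + 2 * (j:Int) - 1) + 1 by ring,
        pvStep ((lo + 2 * (j:Int) - 1) + 1),
        show (lo + 2 * (j:Int) - 1) + 1 - 1 = lo + 2 * (j:Int) - 1 by ring]
      rw [pv_bxor_assoc (computeXOR (lo + 2 * (j:Int) - 1)) _ _,
        ← pv_bxor_assoc (computeXOR (lo - 1)) _ _, ih]
      have hadj := pvAdj (lo + 2 * (j:Int)) (by omega)
      rw [show lo + 2 * (j:Int) - 1 + 1 = lo + 2 * (j:Int) by ring]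
      rw [show lo + 2 * (j:Int) - 1 + 1 + 1 = lo + 2 * (j:Int) + 1 by ring] at *
      rw [hadj]
      by_cases hj : j % 2 = 1
      · simp [hj, show ¬ (j+1) % 2 = 1 by omega, PySem.Int.bxor_self]
      · simp [hj, show (j+1) % 2 = 1 by omega, pv_zero_bxor]

-- Shuffling toolkit for bxor (AC normalization + cancellation).
lemma pv_bxor_self_left (a b : Int) : PySem.Int.bxor a (PySem.Int.bxor a b) = b := by
  rw [← pv_bxor_assoc, PySem.Int.bxor_self, pv_zero_bxor]

lemma pv_bxor_left_comm (a b c : Int) :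
    PySem.Int.bxor a (PySem.Int.bxor b c) = PySem.Int.bxor b (PySem.Int.bxor a c) := by
  rw [← pv_bxor_assoc, PySem.Int.bxor_comm a b, pv_bxor_assoc]

-- Head/tail peeling forms of the prefix-XOR step identity.
lemma pvStep' (n : Int) : computeXOR (n - 1) = PySem.Int.bxor (computeXOR n) n := by
  rw [pvStep n, pv_bxor_assoc, PySem.Int.bxor_self, PySem.Int.bxor_zero]

-- B's per-row pair-cancellation computation equals A's two-endpoint prefix-XOR term.
lemma pvRowClosed (c lo hi : Int) (hle : lo ≤ hi) :
    (let c1 := if PySem.Int.mod lo 2 = 1 then PySem.Int.bxor c lo else c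
     let lo1 := if PySem.Int.mod lo 2 = 1 then lo + 1 else lo
     let c2 := if PySem.Int.mod hi 2 = 0 then PySem.Int.bxor c1 hi else c1
     let hi1 := if PySem.Int.mod hi 2 = 0 then hi - 1 else hi
     if lo1 ≤ hi1 ∧ PySem.Int.mod (PySem.Int.floordiv (hi1 + 1 - lo1) 2) 2 = 1 then
       PySem.Int.bxor c2 1
     else c2)
      = PySem.Int.bxor c (PySem.Int.bxor (computeXOR (lo - 1)) (computeXOR hi)) := by
  have h2 : (0 : Int) < 2 := by norm_num
  simp only [PySem.Int.mod_eq_emod_of_pos h2,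
    PySem.Int.floordiv_eq_ediv_of_pos h2]
  by_cases plo : lo % 2 = 1 <;> by_cases phi : hi % 2 = 0
  · -- lo odd, hi even: strip both ends
    obtain ⟨j, hj1⟩ : ∃ j : Nat, hi - 1 = (lo + 1) + 2 * (j:Int) - 1 := ⟨((hi - lo - 1) / 2).toNat, by omega⟩
    have hmid := pvMid j (lo + 1) (by omega)
    rw [show lo + 1 - 1 = lo by ring, ← hj1] at hmid
    have hH : computeXOR (hi - 1)
        = PySem.Int.bxor (computeXOR lo) (if j % 2 = 1 then 1 else 0) := by
      rw [← hmid, pv_bxor_self_left]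
    simp only [plo, phi, if_pos, if_true]
    rw [show computeXOR hi = PySem.Int.bxor (computeXOR (hi - 1)) hi from pvStep hi,
      pvStep' lo, hH]
    by_cases hj : j % 2 = 1
    · rw [if_pos (by constructor <;> omega), if_pos hj]
      simp [pv_bxor_assoc, PySem.Int.bxor_comm, pv_bxor_left_comm,
        PySem.Int.bxor_self, pv_bxor_self_left, PySem.Int.bxor_zero, pv_zero_bxor]
    · rw [if_neg (by omega), if_neg hj]
      simp [pv_bxor_assoc, PySem.Int.bxor_comm, pv_bxor_left_comm,
        PySem.Int.bxor_self, pv_bxor_self_left, PySem.Int.bxor_zero, pv_zero_bxor]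
  · -- lo odd, hi odd: strip head only
    obtain ⟨j, hj1⟩ : ∃ j : Nat, hi = (lo + 1) + 2 * (j:Int) - 1 := ⟨((hi - lo) / 2).toNat, by omega⟩
    have hmid := pvMid j (lo + 1) (by omega)
    rw [show lo + 1 - 1 = lo by ring, ← hj1] at hmid
    have hH : computeXOR hi
        = PySem.Int.bxor (computeXOR lo) (if j % 2 = 1 then 1 else 0) := by
      rw [← hmid, pv_bxor_self_left]
    simp only [plo, phi, if_pos, if_true, if_neg, if_false]
    rw [pvStep' lo, hH]
    by_cases hj : j % 2 = 1
    · rw [if_pos (by constructor <;> omega), if_pos hj]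
      simp [pv_bxor_assoc, PySem.Int.bxor_comm, pv_bxor_left_comm,
        PySem.Int.bxor_self, pv_bxor_self_left, PySem.Int.bxor_zero, pv_zero_bxor]
    · rw [if_neg (by omega), if_neg hj]
      simp [pv_bxor_assoc, PySem.Int.bxor_comm, pv_bxor_left_comm,
        PySem.Int.bxor_self, pv_bxor_self_left, PySem.Int.bxor_zero, pv_zero_bxor]
  · -- lo even, hi even: strip tail only
    obtain ⟨j, hj1⟩ : ∃ j : Nat, hi - 1 = lo + 2 * (j:Int) - 1 := ⟨((hi - lo) / 2).toNat, by omega⟩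
    have hmid := pvMid j lo (by omega)
    rw [← hj1] at hmid
    have hH : computeXOR (hi - 1)
        = PySem.Int.bxor (computeXOR (lo - 1)) (if j % 2 = 1 then 1 else 0) := by
      rw [← hmid, pv_bxor_self_left]
    simp only [plo, phi, if_pos, if_true, if_neg, if_false]
    rw [show computeXOR hi = PySem.Int.bxor (computeXOR (hi - 1)) hi from pvStep hi, hH]
    by_cases hj : j % 2 = 1
    · rw [if_pos (by constructor <;> omega), if_pos hj]
      simp [pv_bxor_assoc, PySem.Int.bxor_comm, pv_bxor_left_comm,
        PySem.Int.bxor_self, pv_bxor_self_left, PySem.Int.bxor_zero, pv_zero_bxor]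
    · rw [if_neg (by omega), if_neg hj]
      simp [pv_bxor_assoc, PySem.Int.bxor_comm, pv_bxor_left_comm,
        PySem.Int.bxor_self, pv_bxor_self_left, PySem.Int.bxor_zero, pv_zero_bxor]
  · -- lo even, hi odd: pure pairs, no strips
    obtain ⟨j, hj1⟩ : ∃ j : Nat, hi = lo + 2 * (j:Int) - 1 := ⟨((hi - lo + 1) / 2).toNat, by omega⟩
    have hmid := pvMid j lo (by omega)
    rw [← hj1] at hmid
    simp only [plo, phi, if_pos, if_true, if_neg, if_false]
    rw [hmid]
    by_cases hj : j % 2 = 1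
    · rw [if_pos (by constructor <;> omega), if_pos hj]
    · rw [if_neg (by omega), if_neg hj, PySem.Int.bxor_zero]

lemma pvOuter (start length : Int) (k : Nat) (r f0 c : Int) (hk : r + k = length) :
    ((PySem.List.pyRange r length 1).foldl
      (fun (st : Int × Int × Int) row =>
        let first := start + length * row
        let last := first + st.2.1
        (first, st.2.1 - 1,
          PySem.Int.bxor st.2.2 (PySem.Int.bxor (computeXOR (first - 1)) (computeXOR last))))
      (f0, length - 1 - r, c)).2.2
      = (PySem.List.pyRange r length 1).foldl
          (fun checksum row =>
            let lo := start + length * row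
            let hi := lo + (length - 1 - row)
            let c1 := if PySem.Int.mod lo 2 = 1 then PySem.Int.bxor checksum lo else checksum
            let lo1 := if PySem.Int.mod lo 2 = 1 then lo + 1 else lo
            let c2 := if PySem.Int.mod hi 2 = 0 then PySem.Int.bxor c1 hi else c1
            let hi1 := if PySem.Int.mod hi 2 = 0 then hi - 1 else hi
            if lo1 ≤ hi1 ∧ PySem.Int.mod (PySem.Int.floordiv (hi1 + 1 - lo1) 2) 2 = 1 then
              PySem.Int.bxor c2 1
            else c2)
          c := by
  induction k generalizing r f0 c with
  | zero =>
      have : length ≤ r := by omega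
      simp [PySem.List.pyRange_one_eq_nil this]
  | succ k ih =>
      have hr : r < length := by omega
      rw [PySem.List.pyRange_one_cons hr]
      simp only [List.foldl_cons]
      rw [pvRowClosed c (start + length * r) (start + length * r + (length - 1 - r)) (by omega)]
      rw [show length - 1 - r - 1 = length - 1 - (r + 1) by ring]
      exact ih (r + 1) _ _ (by omega)

-- ===== VERDICT (by name: the statement is the Claim_ definition above) =====
theorem solution_spec : Claim_equal_solution := by
  intro start length _
  unfold Spec_solution solution solution_alt
  by_cases hl : 0 < length
  · have hk : (0 : Int) + (length.toNat : Nat) = length := by omega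
    have h := pvOuter start length length.toNat 0 start 0 hk
    rw [show length - 1 - 0 = length - 1 by ring] at h
    exact h
  · simp [PySem.List.pyRange_one_eq_nil (by omega : length ≤ 0)]
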